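-- pv_equiv track=rewrite | github.com/DJDevon3/Classic_Cryptography | Little Orphan Annie Brute Force Decoder/Little_Orphan_Annie_Brute_Force.py | build_caesar_matrix
-- ===== SOURCE A (Python) =====
-- def build_caesar_matrix(text, alphabet, double_space=True):
--     alphabet = alphabet.upper()
--     text = text.upper()
--     L = len(alphabet)
--     matrix = []
--
--     for key in range(L):
--         decoded = ""
--         for char in text:
--             if char in alphabet:
--                 old_idx = alphabet.index(char)
--                 new_idx = (old_idx + key) % L
--                 decoded += alphabet[new_idx]
--             else:
--                 decoded += char
--
--         if double_space:
--             decoded = " ".join(decoded)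
--
--         row = f"{key:02d}: {decoded}"
--         matrix.append(row)
--
--     return matrix
-- ===== SOURCE B (Python) =====
-- def build_caesar_matrix(text, alphabet, double_space=True):
--     alphabet = alphabet.upper()
--     L = len(alphabet)
--     # column-major: for each text character, its entire column of L decodings at once,
--     # as a rotated copy of the alphabet (or the character repeated if not in the alphabet)
--     cols = []
--     for ch in text.upper():
--         i = alphabet.find(ch)
--         cols.append(alphabet[i:] + alphabet[:i] if i >= 0 else ch * L)
--     sep = " " if double_space else ""
--     return ["%02d: %s" % (key, sep.join(col[key] for col in cols)) for key in range(L)]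
-- ===== Notes on version B (the rewrite author's own statement) =====
-- stated objective: faster
-- what changed: B is column-major: instead of A's per-key re-decoding of every character (membership scan + alphabet.index + modular arithmetic in a nested loop), B builds for each text character its whole column of L decodings at once as a rotated alphabet slice alphabet[i:]+alphabet[:i] (or ch*L for non-alphabet characters), then assembles each row by reading one character per column — a transpose of precomputed rotations with no index/mod arithmetic in the key loop.
import Mathlib
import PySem

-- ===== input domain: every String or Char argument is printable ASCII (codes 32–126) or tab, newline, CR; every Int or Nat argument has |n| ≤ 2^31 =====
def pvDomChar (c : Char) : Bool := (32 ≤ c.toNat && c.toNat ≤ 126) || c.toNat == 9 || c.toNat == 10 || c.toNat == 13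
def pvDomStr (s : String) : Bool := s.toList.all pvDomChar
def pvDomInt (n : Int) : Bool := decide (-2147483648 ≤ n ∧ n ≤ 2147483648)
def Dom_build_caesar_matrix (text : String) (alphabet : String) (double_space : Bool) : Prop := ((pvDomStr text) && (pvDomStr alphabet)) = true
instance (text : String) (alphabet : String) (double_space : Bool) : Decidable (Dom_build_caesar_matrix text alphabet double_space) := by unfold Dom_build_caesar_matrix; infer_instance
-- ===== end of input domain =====

-- B is column-major: one rotated-alphabet column per text character, rows assembled by
-- transposition, so the key loop does no membership/index/mod work (objective: faster).

-- ===== PORT A =====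
-- literal port of A; 'char in alphabet' on a single char is list membership, alphabet.index(char)
-- is the first-occurrence index (guarded by membership, so .getD 0 is never the default), and
-- alphabet[new_idx] is in range since 0 ≤ new_idx < L, so pyGetD's default is never used.
def build_caesar_matrix (text : String) (alphabet : String) (double_space : Bool) : List String :=
  let A := PySem.Chars.upper alphabet.toList
  let T := PySem.Chars.upper text.toList
  let L := A.length
  (PySem.List.pyRange 0 (L : Int) 1).foldl (fun matrix key =>
    let decoded := T.foldl (fun acc ch =>
      if ch ∈ A then
        let old_idx : Int := (((PySem.List.index? A ch).getD 0 : Nat) : Int)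
        let new_idx : Int := PySem.Int.mod (old_idx + key) (L : Int)
        acc ++ [PySem.List.pyGetD A new_idx ch]
      else
        acc ++ [ch]) []
    let decoded := if double_space then PySem.Chars.join [' '] (decoded.map (fun c => [c])) else decoded
    -- f"{key:02d}: {decoded}"; key ranges over 0..L-1 so the 02d pad is a single leading '0'
    matrix ++ [String.ofList ((if key < 10 then '0' :: PySem.Int.toChars key else PySem.Int.toChars key) ++ ':' :: ' ' :: decoded)]) []

-- ===== PORT B =====
-- literal port of Source B: alphabet.find(ch) is Chars.find on the singleton; the two slices are
-- alphabet[i:]+alphabet[:i] (i ≥ 0 so slice_from/slice_to apply); ch * L is pyRepeat; col[key]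
-- is in range since every column has length L and 0 ≤ key < L, so pyGetD's default is unused.
def build_caesar_matrix_alt (text : String) (alphabet : String) (double_space : Bool) : List String :=
  let A := PySem.Chars.upper alphabet.toList
  let L := A.length
  let cols := (PySem.Chars.upper text.toList).foldl (fun cols ch =>
    let i : Int := PySem.Chars.find A [ch]
    cols ++ [if 0 ≤ i then PySem.List.slice A (some i) none ++ PySem.List.slice A none (some i)
             else PySem.List.pyRepeat [ch] (L : Int)]) []
  let sep : List Char := if double_space then [' '] else []
  (PySem.List.pyRange 0 (L : Int) 1).map (fun key =>
    let decoded := PySem.Chars.join sep (cols.map (fun col => [PySem.List.pyGetD col key ' ']))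
    -- "%02d: %s"; key ranges over 0..L-1 so the 02d pad is a single leading '0'
    String.ofList ((if key < 10 then '0' :: PySem.Int.toChars key else PySem.Int.toChars key) ++ ':' :: ' ' :: decoded))

-- ===== PRECONDITION & SPEC =====
def Spec_build_caesar_matrix (text : String) (alphabet : String) (double_space : Bool) (out : List String) : Prop := out = build_caesar_matrix_alt text alphabet double_space
instance (text : String) (alphabet : String) (double_space : Bool) (out : List String) : Decidable (Spec_build_caesar_matrix text alphabet double_space out) := by unfold Spec_build_caesar_matrix; infer_instance

-- ===== CLAIM (what is proved, stated in full; the proofs are below) =====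
def Claim_equal_build_caesar_matrix : Prop := ∀ (text : String) (alphabet : String) (double_space : Bool), Dom_build_caesar_matrix text alphabet double_space → Spec_build_caesar_matrix text alphabet double_space (build_caesar_matrix text alphabet double_space)

-- ===== LEMMAS AND PROOFS =====

-- the character decoding A computes for a fixed alphabet and key
def pvF (A : List Char) (key : Int) (c : Char) : Char :=
  if c ∈ A then
    PySem.List.pyGetD A (PySem.Int.mod ((((PySem.List.index? A c).getD 0 : Nat) : Int) + key) (A.length : Int)) c
  else c

-- the column B builds for a text character
def pvCol (A : List Char) (ch : Char) : List Char :=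
  let i : Int := PySem.Chars.find A [ch]
  if 0 ≤ i then PySem.List.slice A (some i) none ++ PySem.List.slice A none (some i)
  else PySem.List.pyRepeat [ch] (A.length : Int)

theorem pv_singleton_infix (A : List Char) (c : Char) : [c] <:+: A ↔ c ∈ A := by
  constructor
  · intro h; exact h.mem (by simp)
  · intro h
    obtain ⟨pre, suf, rfl⟩ := List.append_of_mem h
    exact ⟨pre, suf, by simp⟩

-- alphabet.find(ch) for ch ∈ A is the first-occurrence index, i.e. alphabet.index(ch)
theorem pv_find_singleton (A : List Char) (c : Char) (k : Nat)
    (hk : PySem.List.index? A c = some k) : PySem.Chars.find A [c] = (k : Int) := by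
  obtain ⟨hlt, hak, hfirst⟩ := PySem.List.getElem_of_index?_eq_some hk
  have hmem : c ∈ A := by rw [← hak]; exact List.getElem_mem hlt
  have hnn : 0 ≤ PySem.Chars.find A [c] :=
    (PySem.Chars.find_nonneg_iff A [c]).mpr ((pv_singleton_infix A c).mpr hmem)
  obtain ⟨hpre, hmin⟩ := PySem.Chars.find_spec (s := A) (sub := [c]) hnn
  have hfk : (PySem.Chars.find A [c]).toNat = k := by
    have h1 : ¬ k < (PySem.Chars.find A [c]).toNat := by
      intro hlt'
      exact hmin k hlt' (by
        have : A.drop k = c :: A.drop (k + 1) := by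
          rw [List.drop_eq_getElem_cons hlt, hak]
        rw [this]; exact ⟨A.drop (k + 1), rfl⟩)
    have h2 : ¬ (PySem.Chars.find A [c]).toNat < k := by
      intro hlt'
      obtain ⟨t, ht⟩ := hpre
      have hflen : (PySem.Chars.find A [c]).toNat < A.length := by omega
      have : A[(PySem.Chars.find A [c]).toNat] = c := by
        have := congrArg (fun l => l[0]?) ht
        simpa [List.getElem?_drop, List.getElem?_eq_getElem hflen] using this.symm
      exact hfirst _ hlt' this
    omega
  omega

theorem pv_col_get (A : List Char) (ch : Char) (key : Int)
    (h0 : 0 ≤ key) (hL : key < (A.length : Int)) :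
    PySem.List.pyGetD (pvCol A ch) key ' ' = pvF A key ch := by
  by_cases hm : ch ∈ A
  · obtain ⟨k, hk⟩ := Option.isSome_iff_exists.mp ((PySem.List.index?_isSome_iff A ch).mpr hm)
    obtain ⟨hklt, hak, -⟩ := PySem.List.getElem_of_index?_eq_some hk
    have hf := pv_find_singleton A ch k hk
    have hrot : pvCol A ch = A.rotate k := by
      rw [pvCol, hf]
      rw [if_pos (by positivity), PySem.List.slice_from_natCast, PySem.List.slice_to_natCast,
          List.rotate_eq_drop_append_take (le_of_lt hklt)]
    have hklen : (A.rotate k).length = A.length := by simp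
    have hkey : key.toNat < A.length := by omega
    have hmodlt : 0 < (A.length : Int) := by omega
    have hidx : (PySem.Int.mod (((k : Nat) : Int) + key) ((A.length : Nat) : Int)).toNat
        = (key.toNat + k) % A.length := by
      rw [PySem.Int.mod_eq_emod_of_pos hmodlt]
      have hkk : ((k : Nat) : Int) + key = (((key.toNat + k : Nat)) : Int) := by push_cast; omega
      rw [hkk, ← Int.natCast_mod, Int.toNat_natCast]
    rw [hrot, PySem.List.pyGetD_eq_getElem _ ' ' h0 (by rw [hklen]; exact_mod_cast hL)]
    rw [List.getElem_rotate]
    rw [pvF, if_pos hm, hk]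
    simp only [Option.getD_some]
    rw [PySem.List.pyGetD_eq_getElem _ ch (PySem.Int.mod_nonneg _ hmodlt)
        (PySem.Int.mod_lt _ hmodlt)]
    simp only [hidx]
  · have hf : PySem.Chars.find A [ch] = -1 := by
      rw [PySem.Chars.find_eq_neg_one_iff]
      rw [pv_singleton_infix]; exact hm
    rw [pvCol, hf]
    rw [if_neg (by norm_num), PySem.List.pyRepeat_singleton]
    rw [PySem.List.pyGetD_eq_getElem _ ' ' h0 (by simpa using hL)]
    simp [pvF, hm]

theorem pv_decA (A T : List Char) (key : Int) :
    T.foldl (fun acc ch =>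
      if ch ∈ A then
        acc ++ [PySem.List.pyGetD A (PySem.Int.mod ((((PySem.List.index? A ch).getD 0 : Nat) : Int) + key) (A.length : Int)) ch]
      else acc ++ [ch]) []
      = T.map (pvF A key) := by
  have h : (fun (acc : List Char) ch =>
      if ch ∈ A then
        acc ++ [PySem.List.pyGetD A (PySem.Int.mod ((((PySem.List.index? A ch).getD 0 : Nat) : Int) + key) (A.length : Int)) ch]
      else acc ++ [ch]) = fun acc ch => acc ++ [pvF A key ch] := by
    funext acc ch
    by_cases hm : ch ∈ A <;> simp [pvF, hm]
  rw [h, PySem.List.foldl_append_singleton_eq_map, List.nil_append]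

theorem pv_main (text alphabet : String) (ds : Bool) :
    build_caesar_matrix text alphabet ds = build_caesar_matrix_alt text alphabet ds := by
  unfold build_caesar_matrix build_caesar_matrix_alt
  simp only [PySem.List.foldl_append_singleton_eq_map, List.nil_append]
  refine List.map_congr_left (fun key hkey => ?_)
  obtain ⟨h0, hL⟩ := (PySem.List.mem_pyRange_one).mp hkey
  rw [pv_decA]
  have hcong : List.map (fun col => [PySem.List.pyGetD col key ' '])
        ((PySem.Chars.upper text.toList).map (fun ch =>
          if 0 ≤ PySem.Chars.find (PySem.Chars.upper alphabet.toList) [ch] then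
            PySem.List.slice (PySem.Chars.upper alphabet.toList)
                (some (PySem.Chars.find (PySem.Chars.upper alphabet.toList) [ch])) none
              ++ PySem.List.slice (PySem.Chars.upper alphabet.toList) none
                (some (PySem.Chars.find (PySem.Chars.upper alphabet.toList) [ch]))
          else PySem.List.pyRepeat [ch] ((PySem.Chars.upper alphabet.toList).length : Int)))
      = List.map (fun c => [c])
          ((PySem.Chars.upper text.toList).map (pvF (PySem.Chars.upper alphabet.toList) key)) := by
    rw [List.map_map, List.map_map]
    exact List.map_congr_left (fun ch _ =>
      congrArg (fun c => [c]) (pv_col_get (PySem.Chars.upper alphabet.toList) ch key h0 hL))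
  rw [hcong]
  cases ds
  · simp only [Bool.false_eq_true, if_false, PySem.Chars.join_nil_singletons]
  · simp only [if_true]

-- ===== VERDICT (by name: the statement is the Claim_ definition above) =====
theorem build_caesar_matrix_spec : Claim_equal_build_caesar_matrix := by
  intro text alphabet ds _
  unfold Spec_build_caesar_matrix
  exact pv_main text alphabet ds
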